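-- pv_equiv track=rewrite | github.com/Bergurth/anagram8 | anagram.py | computeValuForEachWord
-- ===== SOURCE A (Python) =====
-- def computeValuForEachWord(filteredWord,jumbledWord):
--     filteredWordValue = 0
--     jumbledWordValue = 0
--     for character in filteredWord:
--         filteredWordValue += ord(character)
--
--     for char in jumbledWord:
--         jumbledWordValue += ord(char)
--     filteredWord = list(filteredWord)
--     if filteredWordValue == jumbledWordValue:
--         for w in jumbledWord:
--             if w not in filteredWord:
--                 return False
--             else:
--                 del filteredWord[filteredWord.index(w)] #For filtering out cases where value becomes same due to multi occurence of same char
--         return True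
--     else:
--         return False
-- ===== SOURCE B (Python) =====
-- def computeValuForEachWord(filteredWord, jumbledWord):
--     if sum(map(ord, filteredWord)) != sum(map(ord, jumbledWord)):
--         return False
--     sf = sorted(filteredWord)
--     i = 0
--     for c in sorted(jumbledWord):
--         while i < len(sf) and sf[i] < c:
--             i += 1
--         if i >= len(sf) or sf[i] != c:
--             return False
--         i += 1
--     return True
-- ===== Notes on version B (the rewrite author's own statement) =====
-- stated objective: faster
-- what changed: Replaces A's per-character 'in'-membership + list.index + del loop (repeated linear scans of a shrinking list) with an ord-sum gate followed by sorting both strings and a single two-pointer merge that checks the same asymmetric submultiset containment.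
import Mathlib
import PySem

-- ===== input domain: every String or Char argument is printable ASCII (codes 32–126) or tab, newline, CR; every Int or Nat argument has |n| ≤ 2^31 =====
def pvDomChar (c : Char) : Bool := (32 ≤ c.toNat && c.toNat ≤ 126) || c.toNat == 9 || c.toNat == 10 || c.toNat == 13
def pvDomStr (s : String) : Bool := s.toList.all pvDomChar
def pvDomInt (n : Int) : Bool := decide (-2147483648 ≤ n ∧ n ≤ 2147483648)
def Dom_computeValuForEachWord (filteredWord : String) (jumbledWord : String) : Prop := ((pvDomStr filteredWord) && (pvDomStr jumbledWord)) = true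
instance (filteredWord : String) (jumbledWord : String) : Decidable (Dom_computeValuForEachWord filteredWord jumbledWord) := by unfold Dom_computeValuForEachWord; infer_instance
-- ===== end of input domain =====

-- B replaces A's per-character membership/erase loop (quadratic scans) by an ord-sum gate
-- plus a two-pointer merge over the two sorted strings; same asymmetric submultiset semantics.

-- ===== PORT A =====
-- the 'if w not in filteredWord: return False else del filteredWord[filteredWord.index(w)]'
-- loop; List.erase removes the first occurrence, exactly 'del fl[fl.index w]' after the
-- membership check succeeded
def pvALoop : List Char → List Char → Bool
  | [], _ => true
  | w :: rest, fl => if fl.contains w then pvALoop rest (fl.erase w) else false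

def computeValuForEachWord (filteredWord : String) (jumbledWord : String) : Bool :=
  let filteredWordValue : Int := filteredWord.toList.foldl (fun a c => a + (c.toNat : Int)) 0
  let jumbledWordValue : Int := jumbledWord.toList.foldl (fun a c => a + (c.toNat : Int)) 0
  if filteredWordValue = jumbledWordValue then
    pvALoop jumbledWord.toList filteredWord.toList
  else
    false

-- ===== PORT B =====
-- the two-pointer walk: for each char of sorted(jumbledWord) advance through sorted(filteredWord)
-- past smaller chars, then require an equal char and consume it
def pvBMerge : List Char → List Char → Bool
  | [], _ => true
  | _ :: _, [] => false
  | c :: cs, f :: fs => if f < c then pvBMerge (c :: cs) fs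
                        else if f = c then pvBMerge cs fs
                        else false

def computeValuForEachWord_alt (filteredWord : String) (jumbledWord : String) : Bool :=
  let fv : Int := (filteredWord.toList.map (fun c => (c.toNat : Int))).sum
  let jv : Int := (jumbledWord.toList.map (fun c => (c.toNat : Int))).sum
  if fv ≠ jv then false
  else pvBMerge (PySem.List.sorted jumbledWord.toList (fun x => x) false)
               (PySem.List.sorted filteredWord.toList (fun x => x) false)

-- ===== PRECONDITION & SPEC =====
def Spec_computeValuForEachWord (filteredWord : String) (jumbledWord : String) (out : Bool) : Prop := out = computeValuForEachWord_alt filteredWord jumbledWord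
instance (filteredWord : String) (jumbledWord : String) (out : Bool) : Decidable (Spec_computeValuForEachWord filteredWord jumbledWord out) := by unfold Spec_computeValuForEachWord; infer_instance

-- ===== CLAIM (what is proved, stated in full; the proofs are below) =====
def Claim_equal_computeValuForEachWord : Prop := ∀ (filteredWord : String) (jumbledWord : String), Dom_computeValuForEachWord filteredWord jumbledWord → Spec_computeValuForEachWord filteredWord jumbledWord (computeValuForEachWord filteredWord jumbledWord)

-- ===== LEMMAS AND PROOFS =====

theorem pvSum_eq (l : List Char) (a : Int) :
    l.foldl (fun a c => a + (c.toNat : Int)) a = a + (l.map (fun c => (c.toNat : Int))).sum := by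
  induction l generalizing a with
  | nil => simp
  | cons c cs ih => simp [List.foldl_cons, ih]; ring

-- A's loop decides the submultiset relation (per-character counts)
theorem pvALoop_iff (j : List Char) : ∀ f, pvALoop j f = true ↔ ∀ c, j.count c ≤ f.count c := by
  induction j with
  | nil => intro f; simp [pvALoop]
  | cons w rest ih =>
    intro f
    by_cases hw : w ∈ f
    · have hcnt : 1 ≤ f.count w := List.one_le_count_iff.mpr hw
      simp only [pvALoop, List.contains_eq_mem, hw, decide_true, if_true, ih]
      constructor
      · intro h c
        have := h c
        rw [List.count_erase] at this
        rw [List.count_cons]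
        by_cases hc : c = w
        · subst hc; simp only [beq_self_eq_true, if_true] at this ⊢; omega
        · simp only [beq_iff_eq, if_neg (Ne.symm hc)] at this ⊢; omega
      · intro h c
        have := h c
        rw [List.count_cons] at this
        rw [List.count_erase]
        by_cases hc : c = w
        · subst hc; simp only [beq_self_eq_true, if_true] at this ⊢; omega
        · simp only [beq_iff_eq, if_neg (Ne.symm hc)] at this ⊢; omega
    · simp only [pvALoop, List.contains_eq_mem, hw, decide_false]
      constructor
      · intro h; exact absurd h (by simp)
      · intro h
        have := h w
        rw [List.count_cons_self, List.count_eq_zero_of_not_mem hw] at this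
        omega

theorem pvCount_eq_zero_of_lt_head {x y : Char} {xs : List Char}
    (hp : (x :: xs).Pairwise (fun a b => a ≤ b)) (hlt : y < x) :
    (x :: xs).count y = 0 := by
  apply List.count_eq_zero_of_not_mem
  intro hmem
  rcases List.mem_cons.mp hmem with h | h
  · exact absurd h (by exact ne_of_lt hlt)
  · exact absurd ((List.pairwise_cons.mp hp).1 y h) (not_le_of_gt hlt)

-- B's merge decides the same relation on sorted lists
theorem pvBMerge_iff (sf : List Char) : ∀ sj : List Char,
    sf.Pairwise (fun a b => a ≤ b) → sj.Pairwise (fun a b => a ≤ b) →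
    (pvBMerge sj sf = true ↔ ∀ c, sj.count c ≤ sf.count c) := by
  induction sf with
  | nil =>
    intro sj _ _
    cases sj with
    | nil => simp [pvBMerge]
    | cons c cs =>
      simp only [pvBMerge, List.count_nil, Bool.false_eq_true, false_iff, not_forall]
      exact ⟨c, by rw [List.count_cons_self]; omega⟩
  | cons f fs ihf =>
    intro sj hf hj
    cases sj with
    | nil => simp [pvBMerge]
    | cons c cs =>
      have hf' := (List.pairwise_cons.mp hf).2
      have hj' := (List.pairwise_cons.mp hj).2
      rcases lt_trichotomy f c with hlt | heq | hgt
      · -- f < c : skip f; no char of c::cs equals f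
        have h0 : (c :: cs).count f = 0 := pvCount_eq_zero_of_lt_head hj hlt
        rw [show pvBMerge (c :: cs) (f :: fs) = pvBMerge (c :: cs) fs by
              simp [pvBMerge, hlt]]
        rw [ihf (c :: cs) hf' hj]
        constructor
        · intro h c'
          have := h c'
          rw [List.count_cons (b := f)]
          by_cases hcf : c' = f
          · subst hcf; rw [h0]; simp
          · simp only [beq_iff_eq, if_neg (Ne.symm hcf)]; omega
        · intro h c'
          have := h c'
          rw [List.count_cons (b := f)] at this
          by_cases hcf : c' = f
          · subst hcf; rw [h0] at this ⊢; omega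
          · simp only [beq_iff_eq, if_neg (Ne.symm hcf)] at this; omega
      · -- f = c : consume both
        subst heq
        rw [show pvBMerge (f :: cs) (f :: fs) = pvBMerge cs fs by
              simp [pvBMerge]]
        rw [ihf cs hf' hj']
        constructor
        · intro h c'
          have := h c'
          rw [List.count_cons, List.count_cons]
          omega
        · intro h c'
          have := h c'
          rw [List.count_cons, List.count_cons] at this
          omega
      · -- c < f : c occurs in lhs but not in rhs
        have h0 : (f :: fs).count c = 0 := pvCount_eq_zero_of_lt_head hf hgt
        rw [show pvBMerge (c :: cs) (f :: fs) = false by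
              simp [pvBMerge, not_lt_of_gt hgt, (ne_of_gt hgt)]]
        simp only [Bool.false_eq_true, false_iff, not_forall]
        exact ⟨c, by rw [h0, List.count_cons_self]; omega⟩

theorem pvALoop_eq_merge (f j : List Char) :
    pvALoop j f = pvBMerge (PySem.List.sorted j (fun x => x) false)
                           (PySem.List.sorted f (fun x => x) false) := by
  rw [Bool.eq_iff_iff, pvALoop_iff,
      pvBMerge_iff _ _ (by simpa using PySem.List.sorted_pairwise f (fun x => x))
                       (by simpa using PySem.List.sorted_pairwise j (fun x => x))]
  constructor
  · intro h c
    rw [(PySem.List.sorted_perm j (fun x => x) false).count_eq,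
        (PySem.List.sorted_perm f (fun x => x) false).count_eq]
    exact h c
  · intro h c
    have := h c
    rwa [(PySem.List.sorted_perm j (fun x => x) false).count_eq,
         (PySem.List.sorted_perm f (fun x => x) false).count_eq] at this

-- ===== VERDICT (by name: the statement is the Claim_ definition above) =====
theorem computeValuForEachWord_spec : Claim_equal_computeValuForEachWord := by
  intro f j _
  unfold Spec_computeValuForEachWord computeValuForEachWord computeValuForEachWord_alt
  simp only [pvSum_eq, zero_add]
  by_cases h : (f.toList.map (fun c => (c.toNat : Int))).sum
               = (j.toList.map (fun c => (c.toNat : Int))).sum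
  · simp [h, pvALoop_eq_merge]
  · simp [h]
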